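-- pv_equiv track=rewrite | github.com/benlepsch/DiscordBot2 | global_functions/__init__.py | is_sohn_in_word
-- ===== SOURCE A (Python) =====
-- sohn = { 's':'<:sohn1:625139707453505561>', 'o':'<:sohn2:625139706950189088>','h':'<:sohn3:625139707432402974>','n':'<:sohn4:625139707533328414>' }
--
-- sohn_letters = ['s','o','h','n']
--
-- def is_sohn_in_word(word):
--     word = list(word)
--     for i in range(len(word) - 3):
--         if word[i] in sohn_letters:
--             issohn = True
--             for j in range(4):
--                 if word[i + j] not in sohn_letters:
--                     issohn = False
--             if issohn:
--                 return sohn[word[i]] + sohn[word[i + 1]] + '\n' + sohn[word[i + 2]] + sohn[word[i + 3]]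
--     return 'not sohn'
-- ===== SOURCE B (Python) =====
-- sohn = { 's':'<:sohn1:625139707453505561>', 'o':'<:sohn2:625139706950189088>','h':'<:sohn3:625139707432402974>','n':'<:sohn4:625139707533328414>' }
--
-- sohn_letters = ['s','o','h','n']
--
-- def is_sohn_in_word(word):
--     buf = []  # the current run of consecutive sohn letters (never longer than 3 before an append)
--     for ch in word:
--         if ch in sohn_letters:
--             buf.append(ch)
--             if len(buf) == 4:
--                 return sohn[buf[0]] + sohn[buf[1]] + '\n' + sohn[buf[2]] + sohn[buf[3]]
--         else:
--             buf = []
--     return 'not sohn'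
-- ===== Notes on version B (the rewrite author's own statement) =====
-- stated objective: alternative
-- what changed: Replaced A's indexed scan over start positions with a per-position nested 4-character re-scan by a single structural pass over the characters that accumulates the current run of consecutive sohn letters in a buffer (reset on any other character) and returns as soon as the buffer reaches length 4.
import Mathlib
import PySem

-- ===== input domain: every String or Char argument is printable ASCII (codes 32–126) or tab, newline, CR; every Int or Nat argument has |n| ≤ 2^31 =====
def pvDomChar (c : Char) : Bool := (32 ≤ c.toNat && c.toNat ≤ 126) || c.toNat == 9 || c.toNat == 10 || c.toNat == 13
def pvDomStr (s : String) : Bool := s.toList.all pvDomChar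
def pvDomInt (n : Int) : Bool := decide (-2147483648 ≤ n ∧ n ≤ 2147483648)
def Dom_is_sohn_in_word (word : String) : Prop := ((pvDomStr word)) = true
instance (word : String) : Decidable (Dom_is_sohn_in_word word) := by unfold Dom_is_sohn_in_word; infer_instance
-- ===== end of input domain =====

-- B replaces A's indexed scan with its per-start nested 4-character re-scan by a single structural
-- pass accumulating the current run of consecutive sohn letters in a buffer (objective: alternative).

-- shared module constants
def sohnLetters : List Char := ['s', 'o', 'h', 'n']

-- the dict 'sohn'; both programs only access it at keys in sohnLetters, so getD's default is never used
def sohnAt (c : Char) : String :=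
  (([('s', "<:sohn1:625139707453505561>"), ('o', "<:sohn2:625139706950189088>"),
     ('h', "<:sohn3:625139707432402974>"), ('n', "<:sohn4:625139707533328414>")] : List (Char × String)).lookup c).getD ""

-- ===== PORT A =====
-- outer loop 'for i in range(len(word) - 3)' as recursion on the start index s
def goA (w : List Char) (s : Nat) : String :=
  if h : s + 3 < w.length then
    if sohnLetters.contains (w.getD s ' ') then
      -- inner loop 'for j in range(4)' computing issohn
      if (List.range 4).all (fun j => sohnLetters.contains (w.getD (s + j) ' ')) then
        sohnAt (w.getD s ' ') ++ sohnAt (w.getD (s + 1) ' ') ++ "\n" ++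
          sohnAt (w.getD (s + 2) ' ') ++ sohnAt (w.getD (s + 3) ' ')
      else goA w (s + 1)
    else goA w (s + 1)
  else "not sohn"
termination_by w.length - s

def is_sohn_in_word (word : String) : String := goA word.toList 0

-- ===== PORT B =====
-- 'for ch in word' as structural recursion on the remaining characters; buf accumulates the
-- current run of consecutive sohn letters, reset on any other character
def goB (buf : List Char) : List Char → String
  | [] => "not sohn"
  | ch :: rest =>
    if sohnLetters.contains ch then
      let buf' := buf ++ [ch]
      if buf'.length = 4 then
        sohnAt (buf'.getD 0 ' ') ++ sohnAt (buf'.getD 1 ' ') ++ "\n" ++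
          sohnAt (buf'.getD 2 ' ') ++ sohnAt (buf'.getD 3 ' ')
      else goB buf' rest
    else goB [] rest

def is_sohn_in_word_alt (word : String) : String := goB [] word.toList

-- ===== PRECONDITION & SPEC =====
def Spec_is_sohn_in_word (word : String) (out : String) : Prop := out = is_sohn_in_word_alt word
instance (word : String) (out : String) : Decidable (Spec_is_sohn_in_word word out) := by unfold Spec_is_sohn_in_word; infer_instance

-- ===== CLAIM (what is proved, stated in full; the proofs are below) =====
def Claim_equal_is_sohn_in_word : Prop := ∀ (word : String), Dom_is_sohn_in_word word → Spec_is_sohn_in_word word (is_sohn_in_word word)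

-- ===== LEMMAS AND PROOFS =====

-- one skip step of A's loop when the window starting at s contains the non-sohn index i
lemma goA_step (w : List Char) (i s : Nat)
    (hc : sohnLetters.contains (w.getD i ' ') = false)
    (h1 : s ≤ i) (h2 : i ≤ s + 3) : goA w s = goA w (s + 1) := by
  rw [goA]
  by_cases h : s + 3 < w.length
  · rw [dif_pos h]
    by_cases ho : sohnLetters.contains (w.getD s ' ') = true
    · rw [if_pos ho]
      have hall : ((List.range 4).all (fun j => sohnLetters.contains (w.getD (s + j) ' '))) = false := by
        have hsi : s + (i - s) = i := by omega
        refine List.all_eq_false.2 ⟨i - s, by simp; omega, ?_⟩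
        rw [hsi]
        simp only [Bool.not_eq_true]
        exact hc
      rw [if_neg ((Bool.not_eq_true _).mpr hall)]
    · rw [if_neg ho]
  · rw [dif_neg h]
    rw [goA]
    rw [dif_neg (by omega)]

-- skipping A's loop from s all the way past the non-sohn index i
lemma goA_skip (w : List Char) (i : Nat)
    (hc : sohnLetters.contains (w.getD i ' ') = false) :
    ∀ k s, i + 1 - s ≤ k → s ≤ i + 1 → i ≤ s + 3 → goA w s = goA w (i + 1) := by
  intro k
  induction k with
  | zero =>
    intro s hk h1 h2
    have hs : s = i + 1 := by omega
    subst hs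
    rfl
  | succ k ih =>
    intro s hk h1 h2
    by_cases hs : s = i + 1
    · subst hs; rfl
    · have h1' : s ≤ i := by omega
      rw [goA_step w i s hc h1' h2]
      exact ih (s + 1) (by omega) (by omega) (by omega)

-- getD of an appended singleton
lemma getD_append_lt (buf : List Char) (ch : Char) (j : Nat) (hj : j < buf.length) :
    (buf ++ [ch]).getD j ' ' = buf.getD j ' ' := by
  rw [List.getD_eq_getElem?_getD, List.getElem?_append_left hj, ← List.getD_eq_getElem?_getD]

lemma getD_append_self (buf : List Char) (ch : Char) :
    (buf ++ [ch]).getD buf.length ' ' = ch := by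
  rw [List.getD_eq_getElem?_getD, List.getElem?_append_right (Nat.le_refl _)]
  simp

-- main invariant: B's pass over the suffix w.drop i with accumulated run buf equals A's loop
-- started at i - buf.length, provided buf records exactly the run of sohn letters ending at i
lemma goB_eq_goA (w : List Char) :
    ∀ rest i buf, w.drop i = rest → buf.length ≤ 3 → buf.length ≤ i →
      (∀ j, j < buf.length → buf.getD j ' ' = w.getD (i - buf.length + j) ' ') →
      (∀ j, j < buf.length → sohnLetters.contains (buf.getD j ' ') = true) →
      goB buf rest = goA w (i - buf.length) := by
  intro rest
  induction rest with
  | nil =>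
    intro i buf hdrop hb3 hbi _ _
    have hlen : w.length ≤ i := by
      have := congrArg List.length hdrop
      simp at this
      omega
    rw [goB, goA, dif_neg (by omega)]
  | cons ch rest ih =>
    intro i buf hdrop hb3 hbi hval hsohn
    have hi : i < w.length := by
      have := congrArg List.length hdrop
      simp at this
      omega
    have hch : w.getD i ' ' = ch := by
      have h0 : (w.drop i).getD 0 ' ' = ch := by rw [hdrop]; rfl
      rwa [List.getD_eq_getElem?_getD, List.getElem?_drop, Nat.add_zero,
        ← List.getD_eq_getElem?_getD] at h0
    have hdrop' : w.drop (i + 1) = rest := by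
      have : w.drop (i + 1) = (w.drop i).drop 1 := by rw [List.drop_drop]
      rw [this, hdrop]
      rfl
    rw [goB]
    by_cases hc : sohnLetters.contains ch = true
    · rw [if_pos hc]
      simp only []
      by_cases h4 : (buf ++ [ch]).length = 4
      · rw [if_pos h4]
        have hb : buf.length = 3 := by simp at h4; omega
        have hv0 := hval 0 (by omega)
        have hv1 := hval 1 (by omega)
        have hv2 := hval 2 (by omega)
        rw [hb] at hv0 hv1 hv2
        have hg3 : (buf ++ [ch]).getD 3 ' ' = ch := by
          rw [← hb]; exact getD_append_self buf ch
        have hs0 : sohnLetters.contains (w.getD (i - 3) ' ') = true := by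
          have := hsohn 0 (by omega)
          rw [hv0] at this
          simpa using this
        have hall : ((List.range 4).all (fun j => sohnLetters.contains (w.getD (i - 3 + j) ' '))) = true := by
          refine List.all_eq_true.2 ?_
          intro j hj
          simp only [List.mem_range] at hj
          interval_cases j
          · simpa using hs0
          · rw [← hv1]; exact hsohn 1 (by omega)
          · rw [← hv2]; exact hsohn 2 (by omega)
          · have e : i - 3 + 3 = i := by omega
            rw [e, hch]; exact hc
        have e3 : i - 3 + 3 = i := by omega
        rw [goA, hb, dif_pos (by omega), if_pos hs0, if_pos hall,
          getD_append_lt buf ch 0 (by omega), getD_append_lt buf ch 1 (by omega),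
          getD_append_lt buf ch 2 (by omega), hg3, hv0, hv1, hv2, Nat.add_zero, e3, hch]
      · rw [if_neg h4]
        have hb : buf.length < 3 := by simp at h4; omega
        have step := ih (i + 1) (buf ++ [ch]) hdrop' (by simp; omega) (by simp; omega)
          (by
            intro j hj
            simp only [List.length_append, List.length_cons, List.length_nil] at hj
            have e : i + 1 - (buf ++ [ch]).length + j = i - buf.length + j := by simp
            rw [e]
            by_cases hjb : j < buf.length
            · rw [getD_append_lt buf ch j hjb]
              exact hval j hjb
            · have hjb' : j = buf.length := by omega
              subst hjb'
              rw [getD_append_self buf ch]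
              have e2 : i - buf.length + buf.length = i := by omega
              rw [e2, hch]
          )
          (by
            intro j hj
            simp only [List.length_append, List.length_cons, List.length_nil] at hj
            by_cases hjb : j < buf.length
            · rw [getD_append_lt buf ch j hjb]; exact hsohn j hjb
            · have hjb' : j = buf.length := by omega
              subst hjb'
              rw [getD_append_self buf ch]
              exact hc
          )
        have e : i + 1 - (buf ++ [ch]).length = i - buf.length := by simp
        rw [e] at step
        exact step
    · rw [if_neg hc]
      rw [ih (i + 1) [] hdrop' (by simp) (by simp) (by intro j hj; simp at hj) (by intro j hj; simp at hj)]
      simp only [List.length_nil, Nat.sub_zero]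
      have hcw : sohnLetters.contains (w.getD i ' ') = false := by
        rw [hch]; simpa using hc
      exact (goA_skip w i hcw (i + 1 - (i - buf.length)) (i - buf.length) (by omega) (by omega) (by omega)).symm

-- ===== VERDICT (by name: the statement is the Claim_ definition above) =====
theorem is_sohn_in_word_spec : Claim_equal_is_sohn_in_word := by
  intro word _
  show is_sohn_in_word word = is_sohn_in_word_alt word
  unfold is_sohn_in_word is_sohn_in_word_alt
  have := goB_eq_goA word.toList word.toList 0 [] rfl (by simp) (by simp)
    (by intro j hj; simp at hj) (by intro j hj; simp at hj)
  simpa using this.symm
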